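-- pv_equiv track=rewrite | github.com/chacham/learn-algorithm | acmicpc.net/2468/solve.py | countIslands
-- ===== SOURCE A (Python) =====
-- def countIslands(N, MAP, H):
--     visited = [[False] * N for _ in range(N)]
--     stack = []
--     res = 0
--     for r in range(N):
--         for c in range(N):
--             if MAP[r][c] > H and not visited[r][c]:
--                 res += 1
--                 stack.append((r, c))
--             while stack:
--                 row, col = stack.pop()
--                 if row < 0 or row >= N or col < 0 or col >= N or visited[row][col] or MAP[row][col] <= H:
--                     continue
--                 visited[row][col] = True
--                 stack.append((row-1, col))
--                 stack.append((row+1, col))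
--                 stack.append((row, col-1))
--                 stack.append((row, col+1))
--     return res
-- ===== SOURCE B (Python) =====
-- def countIslands(N, MAP, H):
--     # Frontier-layer (breadth-first) flood fill over coordinate sets: no stack,
--     # no visited matrix, no duplicate pushes; eligibility checked before insertion.
--     visited = set()
--     res = 0
--     for r in range(N):
--         for c in range(N):
--             if MAP[r][c] > H and (r, c) not in visited:
--                 res += 1
--                 comp = {(r, c)}
--                 frontier = [(r, c)]
--                 while frontier:
--                     nxt = []
--                     for (row, col) in frontier:
--                         for nb in ((row - 1, col), (row + 1, col), (row, col - 1), (row, col + 1)):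
--                             nr, nc = nb
--                             if 0 <= nr < N and 0 <= nc < N and MAP[nr][nc] > H \
--                                and nb not in visited and nb not in comp:
--                                 comp.add(nb)
--                                 nxt.append(nb)
--                     frontier = nxt
--                 visited |= comp
--     return res
-- ===== Notes on version B (the rewrite author's own statement) =====
-- stated objective: alternative
-- what changed: Replaces A's pop-and-recheck DFS stack plus boolean visited matrix by breadth-first frontier-layer growth of coordinate sets (comp/frontier), with eligibility checked once before insertion so no cell is ever enqueued twice.
import Mathlib
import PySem

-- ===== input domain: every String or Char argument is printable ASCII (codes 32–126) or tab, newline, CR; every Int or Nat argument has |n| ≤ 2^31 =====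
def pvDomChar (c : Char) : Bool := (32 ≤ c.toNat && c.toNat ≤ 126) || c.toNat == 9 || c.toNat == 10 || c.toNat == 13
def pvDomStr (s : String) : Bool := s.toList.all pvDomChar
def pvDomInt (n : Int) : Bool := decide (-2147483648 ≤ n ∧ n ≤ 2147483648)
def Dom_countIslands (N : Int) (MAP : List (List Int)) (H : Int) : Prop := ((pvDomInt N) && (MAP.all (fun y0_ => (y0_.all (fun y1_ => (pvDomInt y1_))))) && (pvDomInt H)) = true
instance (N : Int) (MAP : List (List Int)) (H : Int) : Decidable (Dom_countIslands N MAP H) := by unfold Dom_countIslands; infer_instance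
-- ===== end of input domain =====

-- B replaces A's pop-and-recheck DFS stack and boolean visited matrix by
-- breadth-first frontier-layer growth of coordinate sets (objective: alternative).
-- Return-value equivalence only; neither implementation mutates its arguments.

-- MAP[r][c]; the getD defaults are unreachable under Pre_countIslands (indices are 0 ≤ r,c < N there)
def pvMget (MAP : List (List Int)) (r c : Int) : Int :=
  PySem.List.pyGetD (PySem.List.pyGetD MAP r []) c 0

-- ===== PORT A =====
-- visited[row][col]; A only reads it at 0 ≤ row,col < N (guarded), where this is exact
def pvVget (v : List (List Bool)) (r c : Int) : Bool :=
  PySem.List.pyGetD (PySem.List.pyGetD v r []) c false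

-- visited[row][col] = True (A mutates the inner list in place; same matrix value)
def pvVset (v : List (List Bool)) (r c : Int) : List (List Bool) :=
  PySem.List.pySetD v r (PySem.List.pySetD (PySem.List.pyGetD v r []) c true)

-- the 'while stack' loop; stack kept top-first (Python append/pop work at the right
-- end, so pushes are consed in the same textual order). Fuel only totalizes the
-- while loop; it is provably sufficient at every call reached under Pre_.
def pvDrain (N : Int) (MAP : List (List Int)) (H : Int) :
    Nat → List (List Bool) → List (Int × Int) → List (List Bool) × List (Int × Int)
  | _, v, [] => (v, [])
  | 0, v, st => (v, st)
  | fuel + 1, v, (row, col) :: st =>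
      if row < 0 ∨ N ≤ row ∨ col < 0 ∨ N ≤ col ∨ pvVget v row col = true ∨ pvMget MAP row col ≤ H then
        pvDrain N MAP H fuel v st
      else
        pvDrain N MAP H fuel (pvVset v row col)
          ((row, col + 1) :: (row, col - 1) :: (row + 1, col) :: (row - 1, col) :: st)

-- body of A's inner 'for c in range(N)' loop, on the state (visited, stack, res)
def pvCellA (N : Int) (MAP : List (List Int)) (H : Int) (r : Int)
    (s : List (List Bool) × List (Int × Int) × Int) (c : Int) :
    List (List Bool) × List (Int × Int) × Int :=
  let s1 := if H < pvMget MAP r c ∧ pvVget s.1 r c = false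
            then (s.1, (r, c) :: s.2.1, s.2.2 + 1) else s
  let d := pvDrain N MAP H (5 * N.toNat * N.toNat + 5) s1.1 s1.2.1
  (d.1, d.2, s1.2.2)

def countIslands (N : Int) (MAP : List (List Int)) (H : Int) : Int :=
  -- [[False] * N for _ in range(N)] (negative N gives the empty matrix, as in Python)
  let v0 : List (List Bool) := List.replicate N.toNat (List.replicate N.toNat false)
  ((PySem.List.pyRange 0 N 1).foldl (fun s r =>
      (PySem.List.pyRange 0 N 1).foldl (pvCellA N MAP H r) s) (v0, [], 0)).2.2

-- ===== PORT B =====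
def pvNbrs (row col : Int) : List (Int × Int) :=
  [(row - 1, col), (row + 1, col), (row, col - 1), (row, col + 1)]

-- body of 'for nb in ((row-1,col), …)' on the state (comp, nxt)
def pvAddNb (N : Int) (MAP : List (List Int)) (H : Int) (visited : PySem.Set (Int × Int))
    (acc : PySem.Set (Int × Int) × List (Int × Int)) (nb : Int × Int) :
    PySem.Set (Int × Int) × List (Int × Int) :=
  if 0 ≤ nb.1 ∧ nb.1 < N ∧ 0 ≤ nb.2 ∧ nb.2 < N ∧ H < pvMget MAP nb.1 nb.2 ∧
     ¬ PySem.Set.contains visited nb ∧ ¬ PySem.Set.contains acc.1 nb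
  then (PySem.Set.add acc.1 nb, acc.2 ++ [nb]) else acc

-- one round of 'for (row, col) in frontier', returning (comp, nxt)
def pvStep (N : Int) (MAP : List (List Int)) (H : Int) (visited : PySem.Set (Int × Int))
    (comp : PySem.Set (Int × Int)) (frontier : List (Int × Int)) :
    PySem.Set (Int × Int) × List (Int × Int) :=
  frontier.foldl (fun acc cell => (pvNbrs cell.1 cell.2).foldl (pvAddNb N MAP H visited) acc)
    (comp, [])

-- the 'while frontier' loop; fuel totalizes it (each round grows comp, which holds
-- distinct in-bounds cells, so N*N+1 rounds always suffice)
def pvGrow (N : Int) (MAP : List (List Int)) (H : Int) (visited : PySem.Set (Int × Int)) :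
    Nat → PySem.Set (Int × Int) → List (Int × Int) → PySem.Set (Int × Int)
  | _, comp, [] => comp
  | 0, comp, _ => comp
  | fuel + 1, comp, frontier =>
      let p := pvStep N MAP H visited comp frontier
      pvGrow N MAP H visited fuel p.1 p.2

-- body of B's inner 'for c in range(N)' loop, on the state (visited, res)
def pvCellB (N : Int) (MAP : List (List Int)) (H : Int) (r : Int)
    (s : PySem.Set (Int × Int) × Int) (c : Int) : PySem.Set (Int × Int) × Int :=
  if H < pvMget MAP r c ∧ ¬ PySem.Set.contains s.1 (r, c) then
    let comp := pvGrow N MAP H s.1 (N.toNat * N.toNat + 1) (PySem.Set.ofList [(r, c)]) [(r, c)]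
    (PySem.Set.union s.1 comp, s.2 + 1)
  else s

def countIslands_alt (N : Int) (MAP : List (List Int)) (H : Int) : Int :=
  ((PySem.List.pyRange 0 N 1).foldl (fun s r =>
      (PySem.List.pyRange 0 N 1).foldl (pvCellB N MAP H r) s)
    ((PySem.Set.empty : PySem.Set (Int × Int)), (0 : Int))).2

-- ===== PRECONDITION & SPEC =====
-- Pre_ excludes exactly the inputs where A raises IndexError: MAP[r][c] is read for
-- every 0 ≤ r,c < N, so the first N rows must exist and each have length ≥ N.
def Pre_countIslands (N : Int) (MAP : List (List Int)) (H : Int) : Prop :=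
  N ≤ (MAP.length : Int) ∧ ∀ row ∈ MAP.take N.toNat, N ≤ (row.length : Int)
instance (N : Int) (MAP : List (List Int)) (H : Int) : Decidable (Pre_countIslands N MAP H) := by
  unfold Pre_countIslands; infer_instance

def pvWitness_countIslands : Int × List (List Int) × Int := (2, [[1, 2], [3, 0]], 1)

def Spec_countIslands (N : Int) (MAP : List (List Int)) (H : Int) (out : Int) : Prop := out = countIslands_alt N MAP H
instance (N : Int) (MAP : List (List Int)) (H : Int) (out : Int) : Decidable (Spec_countIslands N MAP H out) := by unfold Spec_countIslands; infer_instance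

-- ===== CLAIM (what is proved, stated in full; the proofs are below) =====
def Claim_equal_countIslands : Prop := ∀ (N : Int) (MAP : List (List Int)) (H : Int), Dom_countIslands N MAP H → Pre_countIslands N MAP H → Spec_countIslands N MAP H (countIslands N MAP H)

-- ===== LEMMAS AND PROOFS =====

-- a cell that is in bounds and above the threshold
def pvValid (N : Int) (MAP : List (List Int)) (H : Int) (c : Int × Int) : Prop :=
  0 ≤ c.1 ∧ c.1 < N ∧ 0 ≤ c.2 ∧ c.2 < N ∧ H < pvMget MAP c.1 c.2

-- reachability through ok-cells, by 4-adjacency, from a source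
inductive pvReach (ok : Int × Int → Prop) : Int × Int → Int × Int → Prop
  | refl (c : Int × Int) : ok c → pvReach ok c c
  | tail {a b : Int × Int} (c : Int × Int) :
      pvReach ok a b → c ∈ pvNbrs b.1 b.2 → ok c → pvReach ok a c

theorem pvReach_src {ok : Int × Int → Prop} {s x : Int × Int} (h : pvReach ok s x) : ok s := by
  induction h with
  | refl h => exact h
  | tail _ _ _ _ ih => exact ih

theorem pvReach_dst {ok : Int × Int → Prop} {s x : Int × Int} (h : pvReach ok s x) : ok x := by
  induction h with
  | refl h => exact h
  | tail _ _ _ h _ => exact h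

theorem pvReach_mono {ok1 ok2 : Int × Int → Prop} (hm : ∀ c, ok1 c → ok2 c)
    {s x : Int × Int} (h : pvReach ok1 s x) : pvReach ok2 s x := by
  induction h with
  | refl h => exact .refl _ (hm _ h)
  | tail _ _ hadj hok ih => exact .tail _ ih hadj (hm _ hok)

theorem pvReach_congr {ok1 ok2 : Int × Int → Prop} (hm : ∀ c, ok1 c ↔ ok2 c)
    {s x : Int × Int} : pvReach ok1 s x ↔ pvReach ok2 s x :=
  ⟨pvReach_mono (fun c => (hm c).1), pvReach_mono (fun c => (hm c).2)⟩

theorem pvReach_trans {ok : Int × Int → Prop} {a b c : Int × Int}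
    (h1 : pvReach ok a b) (h2 : pvReach ok b c) : pvReach ok a c := by
  induction h2 with
  | refl _ => exact h1
  | tail _ _ hadj hok ih => exact .tail _ ih hadj hok

theorem pvReach_avoid {ok : Int × Int → Prop} {p s x : Int × Int}
    (h : pvReach ok s x) (hx : x ≠ p) :
    pvReach (fun c => ok c ∧ c ≠ p) s x ∨
      ∃ q ∈ pvNbrs p.1 p.2, pvReach (fun c => ok c ∧ c ≠ p) q x := by
  induction h with
  | refl h => exact .inl (.refl _ ⟨h, hx⟩)
  | @tail b c hab hadj hok ih =>
    by_cases hb : b = p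
    · subst hb
      exact .inr ⟨c, hadj, .refl c ⟨hok, hx⟩⟩
    · rcases ih hb with h' | ⟨q, hq, h'⟩
      · exact .inl (.tail c h' hadj ⟨hok, hx⟩)
      · exact .inr ⟨q, hq, .tail c h' hadj ⟨hok, hx⟩⟩

theorem pvReach_expand {ok : Int × Int → Prop} {p : Int × Int} (hp : ok p)
    (st : List (Int × Int)) (x : Int × Int) :
    (∃ s ∈ p :: st, pvReach ok s x) ↔
      x = p ∨ ∃ s ∈ pvNbrs p.1 p.2 ++ st, pvReach (fun c => ok c ∧ c ≠ p) s x := by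
  constructor
  · rintro ⟨s, hs, h⟩
    by_cases hx : x = p
    · exact .inl hx
    · rcases pvReach_avoid h hx with h' | ⟨q, hq, h'⟩
      · rcases List.mem_cons.1 hs with rfl | hs
        · exact absurd (pvReach_src h').2 (by simp)
        · exact .inr ⟨s, by simp [hs], h'⟩
      · exact .inr ⟨q, by simp [hq], h'⟩
  · rintro (rfl | ⟨s, hs, h⟩)
    · exact ⟨x, by simp, .refl x hp⟩
    · rcases List.mem_append.1 hs with hs | hs
      · refine ⟨p, by simp, pvReach_trans (.tail s (.refl p hp) hs (pvReach_src h).1)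
          (pvReach_mono (fun c h => h.1) h)⟩
      · exact ⟨s, by simp [hs], pvReach_mono (fun c h => h.1) h⟩


-- visited matrices: shape, reads/writes at non-negative indices, unvisited count
def pvShape (n : Nat) (v : List (List Bool)) : Prop :=
  v.length = n ∧ ∀ row ∈ v, row.length = n

def pvUnvis (v : List (List Bool)) : Nat := (v.map (fun row => row.count false)).sum

def pvOkV (N : Int) (MAP : List (List Int)) (H : Int) (v : List (List Bool)) (c : Int × Int) : Prop :=
  pvValid N MAP H c ∧ pvVget v c.1 c.2 = false

theorem pvVget_eq (v : List (List Bool)) {r c : Int} (hr : 0 ≤ r) (hc : 0 ≤ c) :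
    pvVget v r c = (v.getD r.toNat []).getD c.toNat false := by
  obtain ⟨rn, rfl⟩ : ∃ m : Nat, r = (m : Int) := ⟨r.toNat, (Int.toNat_of_nonneg hr).symm⟩
  obtain ⟨cn, rfl⟩ : ∃ m : Nat, c = (m : Int) := ⟨c.toNat, (Int.toNat_of_nonneg hc).symm⟩
  unfold pvVget
  rw [PySem.List.pyGetD_natCast, PySem.List.pyGetD_natCast]
  simp

theorem pvVset_eq (v : List (List Bool)) {r c : Int} (hr : 0 ≤ r) (hc : 0 ≤ c) :
    pvVset v r c = v.set r.toNat ((v.getD r.toNat []).set c.toNat true) := by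
  obtain ⟨rn, rfl⟩ : ∃ m : Nat, r = (m : Int) := ⟨r.toNat, (Int.toNat_of_nonneg hr).symm⟩
  obtain ⟨cn, rfl⟩ : ∃ m : Nat, c = (m : Int) := ⟨c.toNat, (Int.toNat_of_nonneg hc).symm⟩
  unfold pvVset
  rw [PySem.List.pyGetD_natCast, PySem.List.pySetD_natCast, PySem.List.pySetD_natCast]
  simp

theorem pvGetDmem {v : List (List Bool)} {i : Nat} (h : i < v.length) : v.getD i [] ∈ v := by
  rw [List.getD_eq_getElem _ _ h]; exact List.getElem_mem h

theorem pvShape_set {n : Nat} {v : List (List Bool)} (hs : pvShape n v) {r c : Int}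
    (hr : 0 ≤ r) (hc : 0 ≤ c) (hrn : r.toNat < n) : pvShape n (pvVset v r c) := by
  have hlen : v.length = n := hs.1
  have hrv : r.toNat < v.length := by omega
  rw [pvVset_eq v hr hc]
  refine ⟨by simpa using hs.1, ?_⟩
  intro row hrow
  rcases List.mem_or_eq_of_mem_set hrow with h | h
  · exact hs.2 row h
  · subst h
    rw [List.length_set]
    exact hs.2 _ (pvGetDmem hrv)

theorem pvVget_set {n : Nat} {v : List (List Bool)} (hs : pvShape n v) {r c r' c' : Int}
    (hr : 0 ≤ r) (hc : 0 ≤ c) (hr' : 0 ≤ r') (hc' : 0 ≤ c')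
    (hrn : r.toNat < n) (hcn : c.toNat < n) (hrn' : r'.toNat < n) (hcn' : c'.toNat < n) :
    pvVget (pvVset v r c) r' c' = if r' = r ∧ c' = c then true else pvVget v r' c' := by
  have hlen : v.length = n := hs.1
  have hrv : r.toNat < v.length := by omega
  have hrv' : r'.toNat < v.length := by omega
  have hrowlen : (v.getD r.toNat []).length = n := hs.2 _ (pvGetDmem hrv)
  rw [pvVset_eq v hr hc, pvVget_eq _ hr' hc', pvVget_eq _ hr' hc']
  have key : ((v.set r.toNat ((v.getD r.toNat []).set c.toNat true)).getD r'.toNat []).getD c'.toNat false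
      = (if r'.toNat = r.toNat then (v.getD r.toNat []).set c.toNat true else v.getD r'.toNat []).getD c'.toNat false := by
    simp only [List.getD_eq_getElem?_getD, List.getElem?_set]
    by_cases h : r'.toNat = r.toNat
    · simp [h, hrv]
    · simp [h, Ne.symm h]
  rw [key]
  by_cases hre : r' = r
  · have ht : r'.toNat = r.toNat := by rw [hre]
    rw [if_pos ht]
    have key2 : ((v.getD r.toNat []).set c.toNat true).getD c'.toNat false
        = if c'.toNat = c.toNat then true else (v.getD r.toNat []).getD c'.toNat false := by
      simp only [List.getD_eq_getElem?_getD, List.getElem?_set]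
      by_cases h : c'.toNat = c.toNat
      · have hj' : c.toNat < (v[r.toNat]?.getD []).length := by
          rw [← List.getD_eq_getElem?_getD]; omega
        simp [h, hj']
      · simp [h, Ne.symm h]
    rw [key2]
    by_cases hce : c' = c
    · simp [hre, hce]
    · have hnc : ¬ c'.toNat = c.toNat := by omega
      simp [hre, hce, hnc]
  · have hnn : ¬ r'.toNat = r.toNat := by omega
    rw [if_neg hnn]
    simp [hre]

theorem pvUnvis_set {n : Nat} {v : List (List Bool)} (hs : pvShape n v) {r c : Int}
    (hr : 0 ≤ r) (hc : 0 ≤ c) (hrn : r.toNat < n) (hcn : c.toNat < n)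
    (hv : pvVget v r c = false) : pvUnvis (pvVset v r c) + 1 = pvUnvis v := by
  have hlen : v.length = n := hs.1
  have hrv : r.toNat < v.length := by omega
  have hrowlen : (v.getD r.toNat []).length = n := hs.2 _ (pvGetDmem hrv)
  have hj : c.toNat < (v.getD r.toNat []).length := by omega
  have hvj : (v.getD r.toNat [])[c.toNat] = false := by
    have h2 := hv
    rw [pvVget_eq v hr hc, List.getD_eq_getElem _ _ hj] at h2
    exact h2
  rw [pvVset_eq v hr hc]
  unfold pvUnvis
  rw [List.set_eq_take_append_cons_drop]
  conv_rhs => rw [← List.take_append_drop r.toNat v, List.drop_eq_getElem_cons hrv]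
  simp only [hrv, if_pos, List.map_append, List.map_cons, List.sum_append, List.sum_cons]
  have hrow : (((v.getD r.toNat []).set c.toNat true).count false) + 1
      = (v.getD r.toNat []).count false := by
    rw [List.set_eq_take_append_cons_drop, if_pos hj]
    conv_rhs => rw [← List.take_append_drop c.toNat (v.getD r.toNat [])]
    rw [List.count_append, List.count_append, List.drop_eq_getElem_cons hj, hvj]
    simp
    omega
  have hgd : v.getD r.toNat [] = v[r.toNat] := List.getD_eq_getElem _ _ hrv
  rw [hgd] at hrow
  rw [hgd]
  omega

theorem pvUnvis_le {n : Nat} {v : List (List Bool)} (hs : pvShape n v) :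
    pvUnvis v ≤ n * n := by
  have h := hs.2
  have hlen := hs.1
  unfold pvUnvis
  have : ∀ (l : List (List Bool)), (∀ row ∈ l, row.length = n) →
      (l.map (fun row => row.count false)).sum ≤ l.length * n := by
    intro l
    induction l with
    | nil => simp
    | cons a t ih =>
      intro hl
      have ha : a.count false ≤ n := (hl a (by simp)) ▸ List.count_le_length
      have h2 := ih (fun row hr => hl row (by simp [hr]))
      simp only [List.map_cons, List.sum_cons, List.length_cons]
      calc a.count false + (t.map (fun row => row.count false)).sum ≤ n + t.length * n := by
            omega
        _ = (t.length + 1) * n := by ring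
  calc (v.map (fun row => row.count false)).sum ≤ v.length * n := this v h
    _ = n * n := by rw [hlen]


theorem pvOkV_set {N H : Int} {MAP : List (List Int)} {n : Nat} (hn : n = N.toNat)
    {v : List (List Bool)} (hs : pvShape n v) {row col : Int}
    (hr0 : 0 ≤ row) (hrN : row < N) (hc0 : 0 ≤ col) (hcN : col < N) :
    ∀ cc, pvOkV N MAP H (pvVset v row col) cc ↔ (pvOkV N MAP H v cc ∧ cc ≠ (row, col)) := by
  intro cc
  constructor
  · rintro ⟨hval, hvg⟩
    obtain ⟨h1, h2, h3, h4, h5⟩ := hval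
    rw [pvVget_set hs hr0 hc0 h1 h3 (by omega) (by omega) (by omega) (by omega)] at hvg
    by_cases he : cc.1 = row ∧ cc.2 = col
    · rw [if_pos he] at hvg; exact absurd hvg (by simp)
    · rw [if_neg he] at hvg
      exact ⟨⟨⟨h1, h2, h3, h4, h5⟩, hvg⟩, by
        intro hcc; exact he (by rw [hcc]; exact ⟨rfl, rfl⟩)⟩
  · rintro ⟨⟨hval, hvg⟩, hne⟩
    obtain ⟨h1, h2, h3, h4, h5⟩ := hval
    refine ⟨⟨h1, h2, h3, h4, h5⟩, ?_⟩
    rw [pvVget_set hs hr0 hc0 h1 h3 (by omega) (by omega) (by omega) (by omega)]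
    rw [if_neg (by intro he; exact hne (Prod.ext he.1 he.2))]
    exact hvg

theorem pvDrain_char (N : Int) (MAP : List (List Int)) (H : Int) :
    ∀ (fuel : Nat) (v : List (List Bool)) (st : List (Int × Int)),
      pvShape N.toNat v → 5 * pvUnvis v + st.length ≤ fuel →
      (pvDrain N MAP H fuel v st).2 = [] ∧
      pvShape N.toNat (pvDrain N MAP H fuel v st).1 ∧
      (∀ x : Int × Int, 0 ≤ x.1 → x.1 < N → 0 ≤ x.2 → x.2 < N →
        (pvVget (pvDrain N MAP H fuel v st).1 x.1 x.2 = true ↔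
          pvVget v x.1 x.2 = true ∨ ∃ s ∈ st, pvReach (pvOkV N MAP H v) s x)) := by
  intro fuel
  induction fuel with
  | zero =>
    intro v st hs hf
    have hst : st = [] := by
      cases st with
      | nil => rfl
      | cons a t => simp [List.length_cons] at hf
    subst hst
    exact ⟨rfl, hs, by simp [pvDrain]⟩
  | succ fuel ih =>
    intro v st hs hf
    cases st with
    | nil => exact ⟨rfl, hs, by simp [pvDrain]⟩
    | cons p st' =>
      obtain ⟨row, col⟩ := p
      simp only [pvDrain]
      by_cases hg : row < 0 ∨ N ≤ row ∨ col < 0 ∨ N ≤ col ∨ pvVget v row col = true ∨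
          pvMget MAP row col ≤ H
      · rw [if_pos hg]
        have hf' : 5 * pvUnvis v + st'.length ≤ fuel := by
          simp [List.length_cons] at hf; omega
        obtain ⟨h1, h2, h3⟩ := ih v st' hs hf'
        refine ⟨h1, h2, ?_⟩
        intro x hx1 hx2 hx3 hx4
        rw [h3 x hx1 hx2 hx3 hx4]
        have hnok : ¬ pvOkV N MAP H v (row, col) := by
          rintro ⟨⟨a1, a2, a3, a4, a5⟩, a6⟩
          rcases hg with g | g | g | g | g | g
          · omega
          · omega
          · omega
          · omega
          · rw [a6] at g; exact Bool.false_ne_true g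
          · exact absurd a5 (not_lt.2 g)
        constructor
        · rintro (h | ⟨sx, hsx, hr⟩)
          · exact .inl h
          · exact .inr ⟨sx, List.mem_cons_of_mem _ hsx, hr⟩
        · rintro (h | ⟨sx, hsx, hr⟩)
          · exact .inl h
          · rcases List.mem_cons.1 hsx with rfl | hsx
            · exact absurd (pvReach_src hr) hnok
            · exact .inr ⟨sx, hsx, hr⟩
      · rw [if_neg hg]
        push Not at hg
        obtain ⟨hr0, hrN, hc0, hcN, hvf, hm⟩ := hg
        have hvf' : pvVget v row col = false := by
          cases hvget : pvVget v row col
          · rfl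
          · exact absurd hvget hvf
        have hokp : pvOkV N MAP H v (row, col) := ⟨⟨hr0, hrN, hc0, hcN, hm⟩, hvf'⟩
        have hs' : pvShape N.toNat (pvVset v row col) :=
          pvShape_set hs hr0 hc0 (by omega)
        have hu : pvUnvis (pvVset v row col) + 1 = pvUnvis v :=
          pvUnvis_set hs hr0 hc0 (by omega) (by omega) hvf'
        have hf' : 5 * pvUnvis (pvVset v row col) +
            ((row, col + 1) :: (row, col - 1) :: (row + 1, col) :: (row - 1, col) :: st').length ≤ fuel := by
          simp [List.length_cons] at hf ⊢; omega
        obtain ⟨h1, h2, h3⟩ := ih (pvVset v row col) _ hs' hf'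
        refine ⟨h1, h2, ?_⟩
        intro x hx1 hx2 hx3 hx4
        rw [h3 x hx1 hx2 hx3 hx4]
        have hokc := pvOkV_set (rfl : N.toNat = N.toNat) hs hr0 hrN hc0 hcN (MAP := MAP) (H := H)
        have hmem : ∀ s : Int × Int,
            s ∈ ((row, col + 1) :: (row, col - 1) :: (row + 1, col) :: (row - 1, col) :: st') ↔
            s ∈ pvNbrs row col ++ st' := by
          intro s; simp [pvNbrs]; tauto
        have hexp := pvReach_expand (ok := pvOkV N MAP H v) (p := (row, col)) hokp st' x
        have hget := pvVget_set hs hr0 hc0 hx1 hx3 (by omega) (by omega) (by omega) (by omega)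
          (r' := x.1) (c' := x.2)
        have hreq : ∀ s : Int × Int, pvReach (pvOkV N MAP H (pvVset v row col)) s x ↔
            pvReach (fun cc => pvOkV N MAP H v cc ∧ cc ≠ (row, col)) s x :=
          fun s => pvReach_congr hokc
        by_cases hxp : x.1 = row ∧ x.2 = col
        · rw [hget, if_pos hxp]
          simp only [true_or, true_iff]
          exact .inr ⟨(row, col), List.mem_cons_self, by
            have : x = (row, col) := Prod.ext hxp.1 hxp.2
            rw [← this]; exact .refl x (this ▸ hokp)⟩
        · rw [hget, if_neg hxp]
          have hxne : x ≠ (row, col) := by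
            intro h; exact hxp (by rw [h]; exact ⟨rfl, rfl⟩)
          constructor
          · rintro (h | ⟨sx, hsx, hr⟩)
            · exact .inl h
            · refine .inr (hexp.2 (.inr ⟨sx, (hmem sx).1 hsx, (hreq sx).1 hr⟩))
          · rintro (h | h)
            · exact .inl h
            · rcases hexp.1 h with rfl | ⟨sx, hsx, hr⟩
              · exact absurd rfl hxne
              · exact .inr ⟨sx, (hmem sx).2 hsx, (hreq sx).2 hr⟩

-- B side: ok-cells relative to a visited set, step/grow characterisation
def pvOkS (N : Int) (MAP : List (List Int)) (H : Int) (S : List (Int × Int)) (c : Int × Int) : Prop :=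
  pvValid N MAP H c ∧ c ∉ S

theorem pvContains_iff (s : PySem.Set (Int × Int)) (x : Int × Int) :
    PySem.Set.contains s x = true ↔ x ∈ s := by
  simp [PySem.Set.contains]

theorem pvFoldNb_char (N : Int) (MAP : List (List Int)) (H : Int)
    (visited : PySem.Set (Int × Int)) :
    ∀ (ns : List (Int × Int)) (C L : List (Int × Int)), C.Nodup →
    ∃ T, ns.foldl (pvAddNb N MAP H visited) (C, L) = (C ++ T, L ++ T) ∧
      (C ++ T).Nodup ∧
      (∀ x, x ∈ C ++ T ↔ x ∈ C ∨ (x ∈ ns ∧ pvValid N MAP H x ∧ x ∉ visited)) := by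
  intro ns
  induction ns with
  | nil => intro C L hnd; exact ⟨[], by simp, by simpa using hnd, by simp⟩
  | cons nb ns ih =>
    intro C L hnd
    simp only [List.foldl_cons]
    by_cases hp : 0 ≤ nb.1 ∧ nb.1 < N ∧ 0 ≤ nb.2 ∧ nb.2 < N ∧ H < pvMget MAP nb.1 nb.2 ∧
        ¬ PySem.Set.contains visited nb ∧ ¬ PySem.Set.contains ((C, L).1) nb
    · have hnbC : nb ∉ C := fun hm => hp.2.2.2.2.2.2 ((pvContains_iff _ _).2 hm)
      have hstep : pvAddNb N MAP H visited (C, L) nb = (C ++ [nb], L ++ [nb]) := by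
        unfold pvAddNb
        rw [if_pos hp]
        have : PySem.Set.add C nb = C ++ [nb] := by
          simp [PySem.Set.add, hnbC]
        rw [this]
      rw [hstep]
      obtain ⟨T, hT, hTnd, hTm⟩ := ih (C ++ [nb]) (L ++ [nb])
        (by
        rw [List.nodup_append]
        exact ⟨hnd, List.nodup_singleton _,
          fun a ha b hb heq => hnbC ((List.mem_singleton.1 hb) ▸ (heq ▸ ha))⟩)
      refine ⟨[nb] ++ T, by simpa using hT, by simpa using hTnd, ?_⟩
      intro x
      have h1 := hTm x
      simp only [List.append_assoc] at h1 ⊢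
      rw [h1]
      have hvnb : pvValid N MAP H nb := ⟨hp.1, hp.2.1, hp.2.2.1, hp.2.2.2.1, hp.2.2.2.2.1⟩
      have hnvis : nb ∉ visited := fun hm => hp.2.2.2.2.2.1 ((pvContains_iff _ _).2 hm)
      constructor
      · rintro (h | h)
        · rcases List.mem_append.1 h with h | h
          · exact .inl h
          · have : x = nb := by simpa using h
            subst this
            exact .inr ⟨by simp, hvnb, hnvis⟩
        · exact .inr ⟨by simp [h.1], h.2.1, h.2.2⟩
      · rintro (h | ⟨hmem, hval, hvis⟩)
        · exact .inl (List.mem_append.2 (.inl h))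
        · rcases List.mem_cons.1 hmem with rfl | hmem
          · exact .inl (List.mem_append.2 (.inr (by simp)))
          · exact .inr ⟨hmem, hval, hvis⟩
    · have hstep : pvAddNb N MAP H visited (C, L) nb = (C, L) := by
        unfold pvAddNb; rw [if_neg hp]
      rw [hstep]
      obtain ⟨T, hT, hTnd, hTm⟩ := ih C L hnd
      refine ⟨T, hT, hTnd, ?_⟩
      intro x
      rw [hTm x]
      constructor
      · rintro (h | h)
        · exact .inl h
        · exact .inr ⟨List.mem_cons_of_mem _ h.1, h.2⟩
      · rintro (h | ⟨hmem, hval, hvis⟩)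
        · exact .inl h
        · rcases List.mem_cons.1 hmem with rfl | hmem
          · -- the guard failed but x is valid and unvisited: so x was already in C
            by_cases hxC : x ∈ C
            · exact .inl hxC
            · exfalso
              apply hp
              refine ⟨hval.1, hval.2.1, hval.2.2.1, hval.2.2.2.1, hval.2.2.2.2, ?_, ?_⟩
              · intro hcv; exact hvis ((pvContains_iff _ _).1 hcv)
              · intro hcv; exact hxC ((pvContains_iff _ _).1 hcv)
          · exact .inr ⟨hmem, hval, hvis⟩

theorem pvStep_char (N : Int) (MAP : List (List Int)) (H : Int)
    (visited : PySem.Set (Int × Int)) :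
    ∀ (fr : List (Int × Int)) (C : List (Int × Int)), C.Nodup →
    ∃ T, pvStep N MAP H visited C fr = (C ++ T, T) ∧ (C ++ T).Nodup ∧
      (∀ x, x ∈ C ++ T ↔ x ∈ C ∨ ∃ f ∈ fr, x ∈ pvNbrs f.1 f.2 ∧ pvValid N MAP H x ∧ x ∉ visited) := by
  have main : ∀ (fr : List (Int × Int)) (C L : List (Int × Int)), C.Nodup →
      ∃ T, fr.foldl (fun acc cell => (pvNbrs cell.1 cell.2).foldl (pvAddNb N MAP H visited) acc)
          (C, L) = (C ++ T, L ++ T) ∧ (C ++ T).Nodup ∧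
        (∀ x, x ∈ C ++ T ↔ x ∈ C ∨ ∃ f ∈ fr, x ∈ pvNbrs f.1 f.2 ∧ pvValid N MAP H x ∧ x ∉ visited) := by
    intro fr
    induction fr with
    | nil => intro C L hnd; exact ⟨[], by simp, by simpa using hnd, by simp⟩
    | cons f fs ih =>
      intro C L hnd
      simp only [List.foldl_cons]
      obtain ⟨T1, hT1, hT1nd, hT1m⟩ := pvFoldNb_char N MAP H visited (pvNbrs f.1 f.2) C L hnd
      rw [hT1]
      obtain ⟨T2, hT2, hT2nd, hT2m⟩ := ih (C ++ T1) (L ++ T1) hT1nd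
      refine ⟨T1 ++ T2, by simpa [List.append_assoc] using hT2, by simpa [List.append_assoc] using hT2nd, ?_⟩
      intro x
      have h2 := hT2m x
      simp only [List.append_assoc] at h2 ⊢
      rw [h2, hT1m x]
      constructor
      · rintro ((h | h) | ⟨g, hg, hh⟩)
        · exact .inl h
        · exact .inr ⟨f, by simp, h⟩
        · exact .inr ⟨g, List.mem_cons_of_mem _ hg, hh⟩
      · rintro (h | ⟨g, hg, hh⟩)
        · exact .inl (.inl h)
        · rcases List.mem_cons.1 hg with rfl | hg
          · exact .inl (.inr hh)
          · exact .inr ⟨g, hg, hh⟩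
  intro fr C hnd
  obtain ⟨T, hT, hTnd, hTm⟩ := main fr C [] hnd
  exact ⟨T, by simpa [pvStep] using hT, hTnd, hTm⟩

def pvGInv (N : Int) (MAP : List (List Int)) (H : Int) (S : PySem.Set (Int × Int))
    (seed : Int × Int) (comp fr : List (Int × Int)) : Prop :=
  seed ∈ comp ∧ comp.Nodup ∧ (∀ f ∈ fr, f ∈ comp) ∧
  (∀ x ∈ comp, pvReach (pvOkS N MAP H S) seed x) ∧
  (∀ x ∈ comp, x ∉ fr → ∀ q ∈ pvNbrs x.1 x.2, pvOkS N MAP H S q → q ∈ comp)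

theorem pvClosed_reach {N : Int} {MAP : List (List Int)} {H : Int}
    {S : PySem.Set (Int × Int)} {seed : Int × Int} {comp : List (Int × Int)}
    (inv : pvGInv N MAP H S seed comp []) :
    ∀ x, x ∈ comp ↔ pvReach (pvOkS N MAP H S) seed x := by
  intro x
  constructor
  · exact inv.2.2.2.1 x
  · intro h
    induction h with
    | refl h => exact inv.1
    | @tail b q hsb hadj hok ih => exact inv.2.2.2.2 b ih (by simp) q hadj hok

theorem pvCard {N H : Int} {MAP : List (List Int)} {comp : List (Int × Int)}
    (hnd : comp.Nodup) (hval : ∀ x ∈ comp, pvValid N MAP H x) :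
    comp.length ≤ N.toNat * N.toNat := by
  have hsub : comp.toFinset ⊆ (Finset.Ico (0 : Int) N) ×ˢ (Finset.Ico (0 : Int) N) := by
    intro x hx
    obtain ⟨h1, h2, h3, h4, _⟩ := hval x (List.mem_toFinset.1 hx)
    simp [Finset.mem_product, Finset.mem_Ico]
    omega
  calc comp.length = comp.toFinset.card := (List.toFinset_card_of_nodup hnd).symm
    _ ≤ ((Finset.Ico (0 : Int) N) ×ˢ (Finset.Ico (0 : Int) N)).card := Finset.card_le_card hsub
    _ = N.toNat * N.toNat := by simp [Finset.card_product]

theorem pvGrow_nil (N : Int) (MAP : List (List Int)) (H : Int)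
    (S : PySem.Set (Int × Int)) (fuel : Nat) (comp : PySem.Set (Int × Int)) :
    pvGrow N MAP H S fuel comp [] = comp := by
  cases fuel <;> simp [pvGrow]

theorem pvGrow_char (N : Int) (MAP : List (List Int)) (H : Int)
    (S : PySem.Set (Int × Int)) (seed : Int × Int) :
    ∀ (fuel : Nat) (comp fr : List (Int × Int)), pvGInv N MAP H S seed comp fr →
      N.toNat * N.toNat + 1 ≤ fuel + comp.length →
      ∀ x, x ∈ pvGrow N MAP H S fuel comp fr ↔ pvReach (pvOkS N MAP H S) seed x := by
  intro fuel
  induction fuel with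
  | zero =>
    intro comp fr inv hf
    cases fr with
    | nil => rw [pvGrow_nil]; exact pvClosed_reach inv
    | cons f fs =>
      exfalso
      have := pvCard inv.2.1 (fun x hx => (pvReach_dst (inv.2.2.2.1 x hx)).1)
      omega
  | succ fuel ih =>
    intro comp fr inv hf
    cases fr with
    | nil => rw [pvGrow_nil]; exact pvClosed_reach inv
    | cons f fs =>
      simp only [pvGrow]
      obtain ⟨T, hT, hTnd, hTm⟩ := pvStep_char N MAP H S (f :: fs) comp inv.2.1
      rw [hT]
      have hinv' : pvGInv N MAP H S seed (comp ++ T) T := by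
        refine ⟨List.mem_append.2 (.inl inv.1), hTnd, fun g hg => List.mem_append.2 (.inr hg), ?_, ?_⟩
        · intro x hx
          rcases (hTm x).1 hx with h | ⟨g, hg, hnb, hval, hvis⟩
          · exact inv.2.2.2.1 x h
          · have hreach := inv.2.2.2.1 g (inv.2.2.1 g hg)
            exact .tail x hreach hnb ⟨hval, hvis⟩
        · intro x hx hxT q hq hok
          have hxc : x ∈ comp := by
            rcases List.mem_append.1 hx with h | h
            · exact h
            · exact absurd h hxT
          by_cases hxf : x ∈ f :: fs
          · exact (hTm q).2 (.inr ⟨x, hxf, hq, hok.1, hok.2⟩)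
          · exact List.mem_append.2 (.inl (inv.2.2.2.2 x hxc hxf q hq hok))
      cases hTe : T with
      | nil =>
        subst hTe
        rw [pvGrow_nil]
        have : pvGInv N MAP H S seed (comp ++ []) [] := hinv'
        exact pvClosed_reach this
      | cons t ts =>
        subst hTe
        apply ih _ _ hinv'
        simp only [List.length_append, List.length_cons]
        omega

-- outer loop: relation between A's visited matrix and B's visited set
def pvOInv (N : Int) (MAP : List (List Int)) (H : Int)
    (v : List (List Bool)) (S : PySem.Set (Int × Int)) : Prop :=
  pvShape N.toNat v ∧ (∀ x ∈ S, pvValid N MAP H x) ∧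
  (∀ r c : Int, 0 ≤ r → r < N → 0 ≤ c → c < N → (pvVget v r c = true ↔ (r, c) ∈ S))

theorem pvDrain_nil (N : Int) (MAP : List (List Int)) (H : Int) (fuel : Nat)
    (v : List (List Bool)) : pvDrain N MAP H fuel v [] = (v, []) := by
  cases fuel <;> simp [pvDrain]

theorem pvCell_eq {N H : Int} {MAP : List (List Int)} {r c : Int}
    (hr : 0 ≤ r) (hrN : r < N) (hc : 0 ≤ c) (hcN : c < N)
    {v : List (List Bool)} {S : PySem.Set (Int × Int)} {res : Int}
    (inv : pvOInv N MAP H v S) :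
    pvOInv N MAP H (pvCellA N MAP H r (v, [], res) c).1 (pvCellB N MAP H r (S, res) c).1 ∧
    (pvCellA N MAP H r (v, [], res) c).2.1 = [] ∧
    (pvCellA N MAP H r (v, [], res) c).2.2 = (pvCellB N MAP H r (S, res) c).2 := by
  obtain ⟨hshape, hSval, hrel⟩ := inv
  have hmemS := hrel r c hr hrN hc hcN
  by_cases hcond : H < pvMget MAP r c ∧ pvVget v r c = false
  · -- seed case
    have hnotS : (r, c) ∉ S := by
      intro hm
      rw [← hmemS] at hm
      rw [hcond.2] at hm
      exact Bool.false_ne_true hm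
    have hcondB : H < pvMget MAP r c ∧ ¬ PySem.Set.contains S (r, c) = true := by
      exact ⟨hcond.1, fun hct => hnotS ((pvContains_iff _ _).1 hct)⟩
    have hfuel : 5 * pvUnvis v + ([((r : Int), (c : Int))] : List (Int × Int)).length ≤
        5 * N.toNat * N.toNat + 5 := by
      have h5 := pvUnvis_le hshape
      have h6 : 5 * N.toNat * N.toNat = 5 * (N.toNat * N.toNat) := by ring
      simp only [List.length_cons, List.length_nil]
      omega
    obtain ⟨h1, h2, h3⟩ := pvDrain_char N MAP H (5 * N.toNat * N.toNat + 5) v [(r, c)] hshape hfuel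
    have hseedok : pvOkS N MAP H S (r, c) := ⟨⟨hr, hrN, hc, hcN, hcond.1⟩, hnotS⟩
    have hokc : ∀ cc, pvOkV N MAP H v cc ↔ pvOkS N MAP H S cc := by
      intro cc
      unfold pvOkV pvOkS
      constructor
      · rintro ⟨hval, hvg⟩
        refine ⟨hval, fun hm => ?_⟩
        rw [← hrel cc.1 cc.2 hval.1 hval.2.1 hval.2.2.1 hval.2.2.2.1] at hm
        rw [hvg] at hm
        exact Bool.false_ne_true hm
      · rintro ⟨hval, hns⟩
        refine ⟨hval, ?_⟩
        cases hvg : pvVget v cc.1 cc.2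
        · rfl
        · exact absurd ((hrel cc.1 cc.2 hval.1 hval.2.1 hval.2.2.1 hval.2.2.2.1).1 hvg) hns
    have hginv : pvGInv N MAP H S (r, c) (PySem.Set.ofList [(r, c)]) [(r, c)] := by
      refine ⟨by simp [PySem.Set.mem_ofList], PySem.Set.nodup_ofList _, ?_, ?_, ?_⟩
      · intro f hf
        simp at hf
        simp [PySem.Set.mem_ofList, hf]
      · intro x hx
        rw [PySem.Set.mem_ofList] at hx
        simp at hx
        subst hx
        exact .refl _ hseedok
      · intro x hx hxf
        rw [PySem.Set.mem_ofList] at hx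
        simp at hx
        subst hx
        exact absurd (by simp) hxf
    have hcomp := pvGrow_char N MAP H S (r, c) (N.toNat * N.toNat + 1)
      (PySem.Set.ofList [(r, c)]) [(r, c)] hginv (by omega)
    -- assemble
    unfold pvCellA pvCellB
    rw [if_pos hcond, if_pos hcondB]
    refine ⟨⟨h2, ?_, ?_⟩, h1, rfl⟩
    · intro x hx
      rw [PySem.Set.mem_union] at hx
      rcases hx with hx | hx
      · exact hSval x hx
      · exact (pvReach_dst ((hcomp x).1 hx)).1
    · intro r' c' hr' hrN' hc' hcN'
      rw [h3 (r', c') hr' hrN' hc' hcN']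
      rw [PySem.Set.mem_union]
      have : (∃ s ∈ [((r : Int), (c : Int))], pvReach (pvOkV N MAP H v) s (r', c')) ↔
          pvReach (pvOkV N MAP H v) (r, c) (r', c') := by simp
      rw [this, pvReach_congr hokc, ← hcomp (r', c'), hrel r' c' hr' hrN' hc' hcN']
  · -- no seed
    have hcondB : ¬ (H < pvMget MAP r c ∧ ¬ PySem.Set.contains S (r, c) = true) := by
      intro hb
      apply hcond
      refine ⟨hb.1, ?_⟩
      cases hvg : pvVget v r c
      · rfl
      · exact absurd ((pvContains_iff _ _).2 (hmemS.1 hvg)) hb.2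
    unfold pvCellA pvCellB
    rw [if_neg hcond, if_neg hcondB]
    exact ⟨⟨hshape, hSval, hrel⟩, by simp [pvDrain_nil], by simp⟩

theorem pvLoopC_eq {N H : Int} {MAP : List (List Int)} {r : Int}
    (hr : 0 ≤ r) (hrN : r < N) :
    ∀ (cs : List Int), (∀ c ∈ cs, 0 ≤ c ∧ c < N) →
    ∀ (v : List (List Bool)) (S : PySem.Set (Int × Int)) (res : Int), pvOInv N MAP H v S →
    pvOInv N MAP H (cs.foldl (pvCellA N MAP H r) (v, [], res)).1
        (cs.foldl (pvCellB N MAP H r) (S, res)).1 ∧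
    (cs.foldl (pvCellA N MAP H r) (v, [], res)).2.1 = [] ∧
    (cs.foldl (pvCellA N MAP H r) (v, [], res)).2.2 =
      (cs.foldl (pvCellB N MAP H r) (S, res)).2 := by
  intro cs
  induction cs with
  | nil => intro _ v S res inv; exact ⟨inv, rfl, rfl⟩
  | cons c0 cs ih =>
    intro hb v S res inv
    obtain ⟨hc0, hc0N⟩ := hb c0 (by simp)
    obtain ⟨inv', hst', hres'⟩ := pvCell_eq hr hrN hc0 hc0N (res := res) (v := v) (S := S) inv
    simp only [List.foldl_cons]
    rcases hA : pvCellA N MAP H r (v, [], res) c0 with ⟨X, st0, Z⟩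
    rcases hB : pvCellB N MAP H r (S, res) c0 with ⟨S1, res1⟩
    rw [hA] at inv' hst' hres'
    rw [hB] at inv' hres'
    simp only at inv' hst' hres'
    subst hst'
    subst hres'
    exact ih (fun x hx => hb x (List.mem_cons_of_mem _ hx)) _ _ _ inv'

theorem pvLoopR_eq {N H : Int} {MAP : List (List Int)} :
    ∀ (rs : List Int), (∀ x ∈ rs, 0 ≤ x ∧ x < N) →
    ∀ (v : List (List Bool)) (S : PySem.Set (Int × Int)) (res : Int), pvOInv N MAP H v S →
    pvOInv N MAP H
      (rs.foldl (fun s r => (PySem.List.pyRange 0 N 1).foldl (pvCellA N MAP H r) s) (v, [], res)).1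
      (rs.foldl (fun s r => (PySem.List.pyRange 0 N 1).foldl (pvCellB N MAP H r) s) (S, res)).1 ∧
    (rs.foldl (fun s r => (PySem.List.pyRange 0 N 1).foldl (pvCellA N MAP H r) s) (v, [], res)).2.1 = [] ∧
    (rs.foldl (fun s r => (PySem.List.pyRange 0 N 1).foldl (pvCellA N MAP H r) s) (v, [], res)).2.2 =
      (rs.foldl (fun s r => (PySem.List.pyRange 0 N 1).foldl (pvCellB N MAP H r) s) (S, res)).2 := by
  intro rs
  induction rs with
  | nil => intro _ v S res inv; exact ⟨inv, rfl, rfl⟩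
  | cons r0 rs ih =>
    intro hb v S res inv
    obtain ⟨hr0, hr0N⟩ := hb r0 (by simp)
    have hcs : ∀ c ∈ PySem.List.pyRange 0 N 1, 0 ≤ c ∧ c < N := by
      intro c hcm
      rw [PySem.List.mem_pyRange_one] at hcm
      exact hcm
    obtain ⟨inv', hst', hres'⟩ := pvLoopC_eq hr0 hr0N (PySem.List.pyRange 0 N 1) hcs v S res inv
    simp only [List.foldl_cons]
    rcases hA : (PySem.List.pyRange 0 N 1).foldl (pvCellA N MAP H r0) (v, [], res) with ⟨X, st0, Z⟩
    rcases hB : (PySem.List.pyRange 0 N 1).foldl (pvCellB N MAP H r0) (S, res) with ⟨S1, res1⟩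
    rw [hA] at inv' hst' hres'
    rw [hB] at inv' hres'
    simp only at inv' hst' hres'
    subst hst'
    subst hres'
    exact ih (fun x hx => hb x (List.mem_cons_of_mem _ hx)) _ _ _ inv'

theorem pvOInv_init (N : Int) (MAP : List (List Int)) (H : Int) :
    pvOInv N MAP H (List.replicate N.toNat (List.replicate N.toNat false)) PySem.Set.empty := by
  refine ⟨⟨by simp, ?_⟩, ?_, ?_⟩
  · intro row hrow
    rw [List.eq_of_mem_replicate hrow]
    simp
  · intro x hx
    simp [PySem.Set.empty] at hx
  · intro r c hr hrN hc hcN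
    rw [pvVget_eq _ hr hc]
    have h1 : (List.replicate N.toNat (List.replicate N.toNat false)).getD r.toNat [] =
        List.replicate N.toNat false := by
      rw [List.getD_eq_getElem _ _ (by simp; omega)]
      simp
    rw [h1, List.getD_eq_getElem _ _ (by simp; omega)]
    simp [PySem.Set.empty]

-- ===== VERDICT (by name: the statement is the Claim_ definition above) =====
theorem countIslands_spec : Claim_equal_countIslands := by
  intro N MAP H _ _
  unfold Spec_countIslands countIslands countIslands_alt
  have hrs : ∀ x ∈ PySem.List.pyRange 0 N 1, 0 ≤ x ∧ x < N := by
    intro x hx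
    rw [PySem.List.mem_pyRange_one] at hx
    exact hx
  obtain ⟨_, _, hres⟩ := pvLoopR_eq (MAP := MAP) (H := H) (PySem.List.pyRange 0 N 1) hrs
    (List.replicate N.toNat (List.replicate N.toNat false)) PySem.Set.empty 0
    (pvOInv_init N MAP H)
  exact hres
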